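-- pv_equiv track=rewrite | github.com/kojioku/abmptools | tests/test_cg_membrane_packer.py | _split_ndx_sections
-- ===== SOURCE A (Python) =====
-- def _split_ndx_sections(text):
--     """Parse a .ndx text into {group_name: [atom_indices]}."""
--     sections = {}
--     cur = None
--     for raw in text.splitlines():
--         line = raw.strip()
--         if not line:
--             continue
--         if line.startswith("[") and line.endswith("]"):
--             cur = line[1:-1].strip()
--             sections[cur] = []
--         elif cur is not None:
--             sections[cur].extend(int(t) for t in line.split())
--     return sections
-- ===== SOURCE B (Python) =====
-- def _split_ndx_sections(text):
--     """Parse a .ndx text into {group_name: [atom_indices]} in two phases."""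
--     # phase 1: partition the stripped, non-blank lines into (name, body_lines)
--     # pairs in header order; body lines before the first header are dropped
--     pairs = []
--     for raw in text.splitlines():
--         line = raw.strip()
--         if not line:
--             continue
--         if line.startswith("[") and line.endswith("]"):
--             pairs.append((line[1:-1].strip(), []))
--         elif pairs:
--             pairs[-1][1].append(line)
--     # phase 2: build the dict; assignment makes a repeated name overwrite
--     sections = {}
--     for name, body in pairs:
--         sections[name] = [int(t) for line in body for t in line.split()]
--     return sections
-- ===== Notes on version B (the rewrite author's own statement) =====
-- stated objective: alternative
-- what changed: Replaces A's single stateful loop (dict mutated while scanning, with a 'current group' cursor) by a two-phase parse: phase 1 partitions the stripped non-blank lines into an ordered list of (name, body-lines) pairs, dropping pre-header lines; phase 2 builds the dict from those pairs, dict assignment making a repeated group name overwrite.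
import Mathlib
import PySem

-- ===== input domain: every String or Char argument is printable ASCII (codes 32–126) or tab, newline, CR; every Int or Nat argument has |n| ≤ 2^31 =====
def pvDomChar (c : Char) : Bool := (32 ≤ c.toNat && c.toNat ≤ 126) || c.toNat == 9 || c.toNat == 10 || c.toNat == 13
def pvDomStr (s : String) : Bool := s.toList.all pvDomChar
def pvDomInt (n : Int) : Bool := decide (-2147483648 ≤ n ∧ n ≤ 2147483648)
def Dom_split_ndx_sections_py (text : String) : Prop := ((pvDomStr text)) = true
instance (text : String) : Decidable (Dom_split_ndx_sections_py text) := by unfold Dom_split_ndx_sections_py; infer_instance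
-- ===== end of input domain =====

-- B re-parses the .ndx text in two phases (partition into (name, body-lines) pairs, then build the dict)
-- instead of A's single stateful loop; objective: alternative decomposition, not faster.

-- ===== PORT A =====
-- A's single loop over the lines, state = (sections dict, current group name).
-- int(t) is ported as (PySem.Int.ofStr? t).getD 0; the `none` case (ValueError) is excluded by Pre_.
-- sections[cur].extend(...) is ported as Dict.modify (cur is always a present key when it is `some`).
def pvALoop (d : PySem.Dict String (List Int)) (cur : Option String) :
    List String → PySem.Dict String (List Int)
  | [] => d
  | raw :: rest =>
    let line := PySem.Str.strip raw
    if line = "" then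
      pvALoop d cur rest
    else if PySem.Str.startswith line "[" && PySem.Str.endswith line "]" then
      let c := PySem.Str.strip (PySem.Str.slice line (some 1) (some (-1)))
      pvALoop (d.insert c []) (some c) rest
    else
      match cur with
      | some c =>
          pvALoop (d.modify c []
            (fun v => v ++ (PySem.Str.split₀ line).map (fun t => (PySem.Int.ofStr? t).getD 0)))
            (some c) rest
      | none => pvALoop d none rest

def split_ndx_sections_py (text : String) : List (String × List Int) :=
  (pvALoop PySem.Dict.empty none (PySem.Str.splitlines text)).items

-- ===== PORT B =====
-- Phase 1: partition the stripped non-blank lines into (name, body_lines) pairs in header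
-- order, dropping body lines before the first header (pairs[-1][1].append = rewrite the last pair).
def pvBPhase1 (pairs : List (String × List String)) :
    List String → List (String × List String)
  | [] => pairs
  | raw :: rest =>
    let line := PySem.Str.strip raw
    if line = "" then
      pvBPhase1 pairs rest
    else if PySem.Str.startswith line "[" && PySem.Str.endswith line "]" then
      pvBPhase1 (pairs ++ [(PySem.Str.strip (PySem.Str.slice line (some 1) (some (-1))), [])]) rest
    else
      match pairs.getLast? with
      | some (n, b) => pvBPhase1 (pairs.dropLast ++ [(n, b ++ [line])]) rest
      | none => pvBPhase1 pairs rest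

-- [int(t) for line in body for t in line.split()]; int(t) as in port A (Pre_ excludes ValueError)
def pvParseBody (body : List String) : List Int :=
  body.flatMap (fun line => (PySem.Str.split₀ line).map (fun t => (PySem.Int.ofStr? t).getD 0))

-- Phase 2: sections[name] = parsed body, in pair order (a repeated name overwrites).
def split_ndx_sections_py_alt (text : String) : List (String × List Int) :=
  ((pvBPhase1 [] (PySem.Str.splitlines text)).foldl
      (fun d p => d.insert p.1 (pvParseBody p.2)) PySem.Dict.empty).items

-- ===== PRECONDITION & SPEC =====
def pvHeaderLine (line : String) : Bool :=
  PySem.Str.startswith line "[" && PySem.Str.endswith line "]"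

def pvTokensOK (line : String) : Bool :=
  (PySem.Str.split₀ line).all (fun t => (PySem.Int.ofStr? t).isSome)

-- Pre_ excludes exactly the inputs on which A raises ValueError: a non-blank, non-header line
-- that comes after some header line and carries a token int() rejects.
def Pre_split_ndx_sections_py (text : String) : Prop :=
  ∀ j ∈ List.range ((PySem.Str.splitlines text).map PySem.Str.strip).length,
    (((PySem.Str.splitlines text).map PySem.Str.strip).getD j "" ≠ "" ∧
     pvHeaderLine (((PySem.Str.splitlines text).map PySem.Str.strip).getD j "") = false ∧
     ((List.range j).any
       (fun i => pvHeaderLine (((PySem.Str.splitlines text).map PySem.Str.strip).getD i ""))) = true) →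
    pvTokensOK (((PySem.Str.splitlines text).map PySem.Str.strip).getD j "") = true

instance (text : String) : Decidable (Pre_split_ndx_sections_py text) := by
  unfold Pre_split_ndx_sections_py; infer_instance

def pvWitness_split_ndx_sections_py : String := "[ G ]\n 1 2\n3\n[G2]\n4 5"

def Spec_split_ndx_sections_py (text : String) (out : List (String × List Int)) : Prop := out = split_ndx_sections_py_alt text
instance (text : String) (out : List (String × List Int)) : Decidable (Spec_split_ndx_sections_py text out) := by unfold Spec_split_ndx_sections_py; infer_instance

-- ===== CLAIM (what is proved, stated in full; the proofs are below) =====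
def Claim_equal_split_ndx_sections_py : Prop := ∀ (text : String), Dom_split_ndx_sections_py text → Pre_split_ndx_sections_py text → Spec_split_ndx_sections_py text (split_ndx_sections_py text)

-- ===== LEMMAS AND PROOFS =====

-- (d.insert k v).modify k dflt g = d.insert k (g v): the overwrite collapses.
theorem pv_insert_modify_self {ν : Type} (d : PySem.Dict String ν) (k : String) (v : ν)
    (dflt : ν) (g : ν → ν) :
    (d.insert k v).modify k dflt g = d.insert k (g v) := by
  unfold PySem.Dict.modify
  rw [PySem.Dict.getD_insert_self, PySem.Dict.insert_insert_self]

theorem pvParseBody_append_singleton (b : List String) (line : String) :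
    pvParseBody (b ++ [line]) =
      pvParseBody b ++ (PySem.Str.split₀ line).map (fun t => (PySem.Int.ofStr? t).getD 0) := by
  simp [pvParseBody]

-- Lockstep simulation: A's loop starting from the collapse of the pairs built so far
-- (current group = name of the last pair) equals the collapse of B's finished pairs.
theorem pv_main (lines : List String) :
    ∀ (acc : List (String × List String)),
      pvALoop (acc.foldl (fun d p => d.insert p.1 (pvParseBody p.2)) PySem.Dict.empty)
          (acc.getLast?.map Prod.fst) lines
        = (pvBPhase1 acc lines).foldl (fun d p => d.insert p.1 (pvParseBody p.2))
            PySem.Dict.empty := by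
  induction lines with
  | nil => intro acc; simp [pvALoop, pvBPhase1]
  | cons raw rest ih =>
    intro acc
    simp only [pvALoop, pvBPhase1]
    by_cases hblank : PySem.Str.strip raw = ""
    · rw [if_pos hblank, if_pos hblank]
      exact ih acc
    · rw [if_neg hblank, if_neg hblank]
      by_cases hhdr : (PySem.Str.startswith (PySem.Str.strip raw) "["
          && PySem.Str.endswith (PySem.Str.strip raw) "]") = true
      · -- header line: both sides continue with acc ++ [(name, [])]
        rw [if_pos hhdr, if_pos hhdr]
        have h := ih (acc ++ [(PySem.Str.strip
          (PySem.Str.slice (PySem.Str.strip raw) (some 1) (some (-1))), [])])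
        simp only [List.foldl_append, List.foldl_cons, List.foldl_nil,
          List.getLast?_concat, Option.map_some, pvParseBody, List.flatMap_nil] at h
        exact h
      · -- data line
        rw [if_neg hhdr, if_neg hhdr]
        cases hlast : acc.getLast? with
        | none =>
          have hacc : acc = [] := by
            cases acc with
            | nil => rfl
            | cons x xs => simp at hlast
          subst hacc
          exact ih []
        | some p =>
          obtain ⟨n, b⟩ := p
          obtain ⟨l', hl'⟩ := List.getLast?_eq_some_iff.mp hlast
          subst hl'
          have h := ih (l' ++ [(n, b ++ [PySem.Str.strip raw])])
          simp only [List.foldl_append, List.foldl_cons, List.foldl_nil,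
            List.getLast?_concat, Option.map_some] at h
          rw [pvParseBody_append_singleton] at h
          simp only [Option.map_some, List.dropLast_concat,
            List.foldl_append, List.foldl_cons, List.foldl_nil]
          rw [pv_insert_modify_self]
          exact h

-- ===== VERDICT (by name: the statement is the Claim_ definition above) =====
theorem split_ndx_sections_py_spec : Claim_equal_split_ndx_sections_py := by
  intro text _hdom _hpre
  unfold Spec_split_ndx_sections_py split_ndx_sections_py split_ndx_sections_py_alt
  have h := pv_main (PySem.Str.splitlines text) []
  simp only [List.foldl_nil, List.getLast?_nil, Option.map_none] at h
  exact congrArg PySem.Dict.items h
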